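-- pv_equiv track=rewrite | github.com/Isma115/Proyecto-Aurora | memory_manager.py | extract_summaries
-- ===== SOURCE A (Python) =====
-- def extract_summaries(content):
--     """Extrae los resúmenes de un archivo de memoria"""
--     summaries = []
--     current_summary = []
--     in_summary = False
--
--     for line in content.split('\n'):
--         if line.startswith('--- Resumen [') or line.startswith('--- RECUERDO VIVIDO ['):
--             if current_summary:
--                 summaries.append('\n'.join(current_summary))
--             current_summary = [line]
--             in_summary = True
--         elif in_summary:
--             if line.startswith('--- Resumen [') or line.startswith('--- RECUERDO VIVIDO [') or line.startswith('# '):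
--                 summaries.append('\n'.join(current_summary))
--                 current_tag = line.split('[')[0].strip(' -')
--                 is_marker = line.startswith('--- Resumen [') or line.startswith('--- RECUERDO VIVIDO [')
--                 current_summary = [line] if is_marker else []
--                 in_summary = is_marker
--             else:
--                 current_summary.append(line)
--
--     if current_summary:
--         summaries.append('\n'.join(current_summary))
--
--     return summaries
-- ===== SOURCE B (Python) =====
-- def extract_summaries(content):
--     """Extrae los resúmenes de un archivo de memoria"""
--     lines = content.split('\n')
--
--     def is_marker(l):
--         return l.startswith('--- Resumen [') or l.startswith('--- RECUERDO VIVIDO [')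
--
--     starts = [i for i, l in enumerate(lines) if is_marker(l)]
--     out = []
--     for s in starts:
--         e = s + 1
--         while e < len(lines) and not is_marker(lines[e]) and not lines[e].startswith('# '):
--             e += 1
--         out.append('\n'.join(lines[s:e]))
--     return out
-- ===== Notes on version B (the rewrite author's own statement) =====
-- stated objective: alternative
-- what changed: Replaces A's single-pass flag/accumulator state machine with an index-based two-phase approach: first collect the indices of all marker lines, then for each start index scan forward to the first terminator (next marker or '# ' line) and emit the joined slice; the flag, the running current_summary list and the final flush disappear.
import Mathlib
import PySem

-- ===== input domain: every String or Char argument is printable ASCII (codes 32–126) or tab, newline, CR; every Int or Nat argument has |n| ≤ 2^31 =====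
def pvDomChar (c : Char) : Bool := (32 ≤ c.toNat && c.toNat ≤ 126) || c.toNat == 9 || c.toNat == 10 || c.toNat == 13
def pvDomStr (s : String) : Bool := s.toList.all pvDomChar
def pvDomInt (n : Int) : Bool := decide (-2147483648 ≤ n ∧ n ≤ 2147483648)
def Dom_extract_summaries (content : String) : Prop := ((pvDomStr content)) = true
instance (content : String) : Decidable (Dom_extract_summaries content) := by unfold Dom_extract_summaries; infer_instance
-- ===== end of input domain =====

-- B replaces A's flag/accumulator state machine by a marker-index pass plus a forward scan
-- per marker (same O(n) cost, different decomposition).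

-- ===== PORT A =====
-- the for-loop over the lines, carried state (summaries, current_summary, in_summary);
-- the dead local `current_tag` (computed but never used in A) is omitted
def loopA : List String → List String → List String → Bool → List String × List String × Bool
  | [], summaries, current, ins => (summaries, current, ins)
  | line :: rest, summaries, current, ins =>
    if (PySem.Str.startswith line "--- Resumen [" || PySem.Str.startswith line "--- RECUERDO VIVIDO [") = true then
      loopA rest (if current = [] then summaries else summaries ++ [PySem.Str.join "\n" current]) [line] true
    else if ins = true then
      if (PySem.Str.startswith line "--- Resumen [" || PySem.Str.startswith line "--- RECUERDO VIVIDO [" || PySem.Str.startswith line "# ") = true then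
        loopA rest (summaries ++ [PySem.Str.join "\n" current])
          (if (PySem.Str.startswith line "--- Resumen [" || PySem.Str.startswith line "--- RECUERDO VIVIDO [") = true then [line] else [])
          (PySem.Str.startswith line "--- Resumen [" || PySem.Str.startswith line "--- RECUERDO VIVIDO [")
      else loopA rest summaries (current ++ [line]) ins
    else loopA rest summaries current ins

def extract_summaries (content : String) : List String :=
  let r := loopA ((PySem.Str.split? content "\n").getD []) [] [] false
  if r.2.1 = [] then r.1 else r.1 ++ [PySem.Str.join "\n" r.2.1]

-- ===== PORT B =====
def bIsMarker (l : String) : Bool :=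
  PySem.Str.startswith l "--- Resumen [" || PySem.Str.startswith l "--- RECUERDO VIVIDO ["

-- the comprehension `[i for i, l in enumerate(lines) if is_marker(l)]` (indices are Nat: nonneg)
def bStarts : List String → Nat → List Nat
  | [], _ => []
  | l :: ls, i => (if bIsMarker l then [i] else []) ++ bStarts ls (i + 1)

-- the `while` loop advancing e to the first terminator at or after e
def bFindEnd (lines : List String) (e : Nat) : Nat :=
  if h : e < lines.length then
    if bIsMarker lines[e] || PySem.Str.startswith lines[e] "# " then e
    else bFindEnd lines (e + 1)
  else e
termination_by lines.length - e
decreasing_by omega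

def extract_summaries_alt (content : String) : List String :=
  let lines := (PySem.Str.split? content "\n").getD []
  (bStarts lines 0).map (fun s =>
    let e := bFindEnd lines (s + 1)
    PySem.Str.join "\n" ((lines.drop s).take (e - s)))

-- ===== PRECONDITION & SPEC =====
def Spec_extract_summaries (content : String) (out : List String) : Prop := out = extract_summaries_alt content
instance (content : String) (out : List String) : Decidable (Spec_extract_summaries content out) := by unfold Spec_extract_summaries; infer_instance

-- ===== CLAIM (what is proved, stated in full; the proofs are below) =====
def Claim_equal_extract_summaries : Prop := ∀ (content : String), Dom_extract_summaries content → Spec_extract_summaries content (extract_summaries content)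

-- ===== LEMMAS AND PROOFS =====

-- a line terminating a block: a new marker or a '# ' header
def pvTerm (l : String) : Bool := bIsMarker l || PySem.Str.startswith l "# "

-- the common reference semantics: each marker opens a block that runs to the next terminator
def pvSpec : List String → List String
  | [] => []
  | l :: ls =>
    if bIsMarker l then
      PySem.Str.join "\n" (l :: ls.takeWhile (fun x => !pvTerm x)) :: pvSpec (ls.dropWhile (fun x => !pvTerm x))
    else pvSpec ls
termination_by ls => ls.length
decreasing_by
  · have := (List.dropWhile_sublist (l := ls) (p := fun x => !pvTerm x)).length_le
    simp only [List.length_cons]; omega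
  · simp only [List.length_cons]; omega

def pvFinish (r : List String × List String × Bool) : List String :=
  if r.2.1 = [] then r.1 else r.1 ++ [PySem.Str.join "\n" r.2.1]

theorem pvSpec_dropWhile (ls : List String) :
    pvSpec (ls.dropWhile (fun x => !pvTerm x)) = pvSpec ls := by
  induction ls with
  | nil => rfl
  | cons l ls ih =>
    by_cases ht : pvTerm l = true
    · simp [ht]
    · have hm : bIsMarker l = false := by
        simp [pvTerm] at ht; exact ht.1
      simp [ht, pvSpec, hm, ih]

theorem loopA_spec (ls : List String) :
    (∀ acc, pvFinish (loopA ls acc [] false) = acc ++ pvSpec ls) ∧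
    (∀ acc cur, cur ≠ [] →
      pvFinish (loopA ls acc cur true)
        = acc ++ [PySem.Str.join "\n" (cur ++ ls.takeWhile (fun x => !pvTerm x))]
            ++ pvSpec (ls.dropWhile (fun x => !pvTerm x))) := by
  induction ls with
  | nil =>
    constructor
    · intro acc; simp [loopA, pvFinish, pvSpec]
    · intro acc cur hc; simp [loopA, pvFinish, hc, pvSpec]
  | cons l ls ih =>
    obtain ⟨ih1, ih2⟩ := ih
    by_cases hm : bIsMarker l = true
    · have hm' := hm
      simp only [bIsMarker] at hm'
      have ht : pvTerm l = true := by rw [pvTerm, hm, Bool.true_or]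
      constructor
      · intro acc
        simp only [loopA, hm', if_true]
        rw [ih2 acc [l] (by simp)]
        simp [pvSpec, hm]
      · intro acc cur hc
        simp only [loopA, hm', if_true]
        rw [if_neg hc, ih2 (acc ++ [PySem.Str.join "\n" cur]) [l] (by simp)]
        simp [pvSpec, hm, ht]
    · have hab : PySem.Str.startswith l "--- Resumen [" = false ∧
          PySem.Str.startswith l "--- RECUERDO VIVIDO [" = false := by
        simpa [bIsMarker, Bool.or_eq_false_iff] using hm
      obtain ⟨ha, hb⟩ := hab
      by_cases hh : PySem.Str.startswith l "# " = true
      · have ht : pvTerm l = true := by rw [pvTerm, hh, Bool.or_true]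
        constructor
        · intro acc
          simp only [loopA, ha, hb, hh, Bool.false_or, Bool.or_false, Bool.false_eq_true,
            if_false, if_true]
          rw [ih1 acc]
          simp [pvSpec, hm]
        · intro acc cur hc
          simp only [loopA, ha, hb, hh, Bool.false_or, Bool.or_false, Bool.false_eq_true,
            if_false, if_true]
          rw [ih1 (acc ++ [PySem.Str.join "\n" cur])]
          simp [pvSpec, hm, ht]
      · have hh' : PySem.Str.startswith l "# " = false := by simpa using hh
        have hm0 : bIsMarker l = false := by simpa using hm
        have ht : pvTerm l = false := by rw [pvTerm, hm0, hh']; rfl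
        constructor
        · intro acc
          simp only [loopA, ha, hb, hh', Bool.or_false, Bool.false_eq_true,
            if_false]
          rw [ih1 acc]
          simp [pvSpec, hm]
        · intro acc cur hc
          simp only [loopA, ha, hb, hh', Bool.or_false, Bool.false_eq_true,
            if_false, if_true]
          rw [ih2 acc (cur ++ [l]) (by simp)]
          simp [ht]

theorem bFindEnd_ge (lines : List String) (e : Nat) : e ≤ bFindEnd lines e := by
  unfold bFindEnd
  split
  · split
    · exact le_refl _
    · have := bFindEnd_ge lines (e + 1)
      omega
  · exact le_refl _
termination_by lines.length - e
decreasing_by omega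

theorem bFindEnd_shift (l : String) (ls : List String) (e : Nat) :
    bFindEnd (l :: ls) (e + 1) = bFindEnd ls e + 1 := by
  conv_lhs => rw [bFindEnd]
  conv_rhs => rw [bFindEnd]
  by_cases h : e < ls.length
  · have h1 : e + 1 < (l :: ls).length := by simp only [List.length_cons]; omega
    rw [dif_pos h1, dif_pos h]
    have hg : (l :: ls)[e + 1]'h1 = ls[e]'h := by simp
    rw [hg]
    split
    · rfl
    · exact bFindEnd_shift l ls (e + 1)
  · rw [dif_neg (by simp only [List.length_cons]; omega), dif_neg h]
termination_by ls.length - e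
decreasing_by omega

theorem bFindEnd_zero (ls : List String) :
    bFindEnd ls 0 = ((ls.takeWhile (fun x => !pvTerm x)).length) := by
  induction ls with
  | nil => unfold bFindEnd; simp
  | cons l ls ih =>
    rw [bFindEnd]
    have h0 : 0 < (l :: ls).length := by simp
    rw [dif_pos h0]
    have hget : (bIsMarker ((l :: ls)[0]'h0) || PySem.Str.startswith ((l :: ls)[0]'h0) "# ") = pvTerm l := by
      rw [List.getElem_cons_zero, pvTerm]
    by_cases ht : pvTerm l = true
    · rw [hget, if_pos ht]
      simp [ht]
    · have ht' : pvTerm l = false := by simpa using ht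
      rw [hget, if_neg (by simp [ht'])]
      rw [bFindEnd_shift, ih]
      simp [ht']

theorem bStarts_shift (ls : List String) (i : Nat) :
    bStarts ls (i + 1) = (bStarts ls i).map (fun s => s + 1) := by
  induction ls generalizing i with
  | nil => rfl
  | cons x xs ihx => by_cases hx : bIsMarker x = true <;> simp [bStarts, hx, ihx]

theorem bBlocks_spec (ls : List String) :
    (bStarts ls 0).map (fun s =>
      PySem.Str.join "\n" ((ls.drop s).take (bFindEnd ls (s + 1) - s))) = pvSpec ls := by
  induction ls with
  | nil => simp [bStarts, pvSpec]
  | cons l ls ih =>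
    have htail :
        (bStarts ls 1).map (fun s =>
          PySem.Str.join "\n" (((l :: ls).drop s).take (bFindEnd (l :: ls) (s + 1) - s))) = pvSpec ls := by
      rw [show (1 : Nat) = 0 + 1 from rfl, bStarts_shift, List.map_map]
      rw [← ih]
      apply List.map_congr_left
      intro s _
      simp only [Function.comp]
      rw [bFindEnd_shift]
      simp only [List.drop_succ_cons]
      have he : bFindEnd ls (s + 1) + 1 - (s + 1) = bFindEnd ls (s + 1) - s := by omega
      rw [he]
    by_cases hm : bIsMarker l = true
    · have hhead :
          PySem.Str.join "\n" (((l :: ls).drop 0).take (bFindEnd (l :: ls) (0 + 1) - 0))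
            = PySem.Str.join "\n" (l :: ls.takeWhile (fun x => !pvTerm x)) := by
        rw [bFindEnd_shift, bFindEnd_zero]
        congr 1
        simp only [List.drop_zero, Nat.sub_zero, List.take_succ_cons]
        congr 1
        exact ((List.prefix_iff_eq_take.mp (List.takeWhile_prefix _))).symm
      simp only [bStarts, hm, if_true, Nat.zero_add, List.singleton_append, List.map_cons]
      rw [hhead, htail]
      rw [pvSpec]
      rw [if_pos hm, pvSpec_dropWhile]
    · simp only [bStarts, hm, Bool.false_eq_true, if_false, Nat.zero_add, List.nil_append]
      rw [htail, pvSpec, if_neg (by simp [hm])]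

-- ===== VERDICT (by name: the statement is the Claim_ definition above) =====
theorem extract_summaries_spec : Claim_equal_extract_summaries := by
  intro content _
  unfold Spec_extract_summaries extract_summaries extract_summaries_alt
  rw [bBlocks_spec]
  show pvFinish (loopA ((PySem.Str.split? content "\n").getD []) [] [] false)
        = pvSpec ((PySem.Str.split? content "\n").getD [])
  rw [(loopA_spec ((PySem.Str.split? content "\n").getD [])).1 []]
  simp
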